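-- pv_equiv track=rewrite | github.com/its-h4k1/desert-storm-roster-optimizer | src/alias_utils.py | _prune_cycles
-- ===== SOURCE A (Python) =====
-- from typing import Dict, Iterable, Optional, Set, List, Tuple
--
-- def _prune_cycles(raw_map: Dict[str, str]) -> Tuple[Dict[str, str], Set[str]]:
--     """Entfernt Alias-Regeln, die Zyklen erzeugen.
--
--     Statt den gesamten Import scheitern zu lassen, werden nur die direkt
--     betroffenen Quellen entfernt. So bleiben valide Aliase verfügbar und
--     Problemfälle können dennoch identifiziert werden.
--     """
--
--     graph = dict(raw_map)
--     visited: Set[str] = set()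
--     active: Set[str] = set()
--     cycle_nodes: Set[str] = set()
--
--     def dfs(node: str, stack: List[str]):
--         if node in visited or node in cycle_nodes:
--             return
--         if node in active:
--             # Zyklus gefunden → alle Nodes ab erstem Auftreten im Stack markieren
--             try:
--                 start = stack.index(node)
--             except ValueError:
--                 start = 0
--             cycle_nodes.update(stack[start:])
--             return
--
--         active.add(node)
--         stack.append(node)
--         target = graph.get(node)
--         if target is not None:
--             dfs(target, stack)
--         stack.pop()
--         active.remove(node)
--         visited.add(node)
--
--     for node in list(graph.keys()):
--         if node not in visited:
--             dfs(node, [])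
--
--     if not cycle_nodes:
--         return graph, set()
--
--     for node in cycle_nodes:
--         graph.pop(node, None)
--
--     return graph, cycle_nodes
-- ===== SOURCE B (Python) =====
-- from typing import Dict, Set, Tuple
--
--
-- def _prune_cycles(raw_map: Dict[str, str]) -> Tuple[Dict[str, str], Set[str]]:
--     """Iterative chain-walking replacement for the recursive DFS.
--
--     Each node has at most one successor, so every walk is a simple chain: follow
--     it with a position index until it leaves the graph, reaches an already
--     resolved node, or bites its own tail (= a cycle).
--     """
--     graph = dict(raw_map)
--     resolved = set()
--     cycle_list = []
--     for root in graph: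
--         if root in resolved:
--             continue
--         path = []
--         pos = {}
--         node = root
--         while node in graph and node not in resolved and node not in pos:
--             pos[node] = len(path)
--             path.append(node)
--             node = graph[node]
--         if node in pos:
--             cycle_list.extend(path[pos[node]:])
--         resolved.update(path)
--     cycle_nodes = set(cycle_list)
--     if not cycle_nodes:
--         return graph, set()
--     graph = {k: v for k, v in graph.items() if k not in cycle_nodes}
--     return graph, cycle_nodes
-- ===== Notes on version B (the rewrite author's own statement) =====
-- stated objective: simpler
-- what changed: A's recursive DFS with shared visited/active/cycle sets, a mutable stack and stack.index() is replaced by an iterative chain walk per root (each node has at most one successor) that records positions in a dict, detects a cycle when the walk bites its own tail, and rebuilds the pruned dict with a comprehension instead of in-place pops.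
import Mathlib
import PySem

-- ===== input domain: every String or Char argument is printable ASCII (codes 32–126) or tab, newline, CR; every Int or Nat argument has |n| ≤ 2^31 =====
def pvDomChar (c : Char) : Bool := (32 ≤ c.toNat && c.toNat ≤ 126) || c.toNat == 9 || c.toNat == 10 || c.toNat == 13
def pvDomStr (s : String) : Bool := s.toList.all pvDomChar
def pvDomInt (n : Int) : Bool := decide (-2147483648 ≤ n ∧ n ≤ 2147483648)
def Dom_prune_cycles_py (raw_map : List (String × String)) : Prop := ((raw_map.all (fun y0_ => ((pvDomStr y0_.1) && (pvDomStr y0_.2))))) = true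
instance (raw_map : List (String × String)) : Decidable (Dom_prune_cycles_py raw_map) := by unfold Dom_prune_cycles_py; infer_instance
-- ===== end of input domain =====

-- B replaces A's recursive DFS (visited/active/cycle sets + mutable stack + stack.index)
-- by an iterative per-root chain walk with a position dict and one resolved set: simpler.

-- ===== PORT A =====
-- helpers used by the ports' termination proofs (cited in decreasing_by)

theorem pvFilterLenLt {α : Type} (l : List α) (p q : α → Bool)
    (himp : ∀ y, q y = true → p y = true) (x : α) (hx : x ∈ l)
    (hp : p x = true) (hq : q x = false) :
    (l.filter q).length < (l.filter p).length := by
  induction l with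
  | nil => cases hx
  | cons a t ih =>
    rcases List.mem_cons.1 hx with rfl | hxt
    · have hle : (t.filter q).length ≤ (t.filter p).length :=
        ((List.monotone_filter_right t (fun y hy => himp y hy)).length_le)
      simp [hp, hq]; omega
    · by_cases hqa : q a = true
      · have hpa := himp a hqa
        simp [hpa, hqa]; exact ih hxt
      · have h := ih hxt
        simp at hqa
        by_cases hpa : p a = true <;> simp [hpa, hqa] <;> omega

theorem pvMemKeys_of_get? {g : PySem.Dict String String} {node t : String}
    (h : g.get? node = some t) : node ∈ g.keys := by
  have : g.contains node = true := by
    rw [PySem.Dict.contains_eq_isSome_get?, h]; rfl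
  exact (PySem.Dict.contains_iff_mem_keys g node).1 this

theorem pvContains_add (s : PySem.Set String) (x y : String) :
    PySem.Set.contains (PySem.Set.add s x) y = (PySem.Set.contains s y || y == x) := by
  simp only [PySem.Set.contains_eq_listContains, PySem.Set.add,
    PySem.Set.contains_eq_listContains]
  split_ifs with h <;> by_cases hyx : y = x <;> simp_all

def dfsA (g : PySem.Dict String String) (node : String) (stack : List String)
    (visited active cycle : PySem.Set String) :
    PySem.Set String × PySem.Set String × PySem.Set String :=
  if PySem.Set.contains visited node || PySem.Set.contains cycle node then
    (visited, active, cycle)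
  else if PySem.Set.contains active node then
    let start : Int := ((PySem.List.index? stack node).map Int.ofNat).getD 0
    (visited, active, PySem.Set.update cycle (PySem.List.slice stack (some start) none))
  else
    let r :=
      match h : g.get? node with
      | some t => dfsA g t (stack ++ [node]) visited (PySem.Set.add active node) cycle
      | none => (visited, PySem.Set.add active node, cycle)
    (PySem.Set.add r.1 node, PySem.Set.discard r.2.1 node, r.2.2)
termination_by (g.keys.filter (fun k => !(PySem.Set.contains active k))).length
decreasing_by
  refine pvFilterLenLt _ _ _ ?_ node (pvMemKeys_of_get? h) ?_ ?_
  · intro y hy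
    rw [pvContains_add] at hy
    simp only [Bool.not_or, Bool.and_eq_true, Bool.not_eq_true'] at hy
    simpa using hy.1
  · simpa using ‹¬PySem.Set.contains active node = true›
  · simp

def walkB (g : PySem.Dict String String) (resolved : PySem.Set String) (node : String)
    (path : List String) (pos : PySem.Dict String Int) :
    List String × PySem.Dict String Int × String :=
  if g.contains node && !(PySem.Set.contains resolved node) && !(pos.contains node) then
    walkB g resolved ((g.get? node).getD "") (path ++ [node])
      (pos.insert node (path.length : Int))
  else (path, pos, node)
termination_by (g.keys.filter (fun k => !(pos.contains k))).length
decreasing_by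
  rename_i hcond
  simp only [Bool.and_eq_true, Bool.not_eq_true'] at hcond
  refine pvFilterLenLt _ _ _ ?_ node ((PySem.Dict.contains_iff_mem_keys g node).1 hcond.1.1) ?_ ?_
  · intro y hy
    rw [PySem.Dict.contains_insert] at hy
    simp only [Bool.not_or, Bool.and_eq_true, Bool.not_eq_true'] at hy
    simp [hy.2]
  · simp [hcond.2]
  · simp


-- prune_cycles_py: LITERAL port of A. The inner `dfs` is dfsA above; `graph.pop(node, None)`
-- is Dict.erase (the default only suppresses KeyError); the returned dicts are their item lists.
def prune_cycles_py (raw_map : List (String × String)) : (List (String × String)) × List String :=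
  let graph := PySem.Dict.ofList raw_map
  let st := graph.keys.foldl
    (fun (st : PySem.Set String × PySem.Set String × PySem.Set String) node =>
      if !(PySem.Set.contains st.1 node) then dfsA graph node [] st.1 st.2.1 st.2.2 else st)
    (PySem.Set.empty, PySem.Set.empty, PySem.Set.empty)
  if st.2.2.isEmpty then (graph.items, PySem.Set.empty)
  else ((st.2.2.foldl (fun (h : PySem.Dict String String) n => h.erase n) graph).items, st.2.2)

-- ===== PORT B =====
-- prune_cycles_py_alt: port of Source B. `graph[node]` inside the loop is exact via getD ""
-- because the loop condition just checked `node in graph`.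
def prune_cycles_py_alt (raw_map : List (String × String)) : (List (String × String)) × List String :=
  let graph := PySem.Dict.ofList raw_map
  let acc := graph.keys.foldl
    (fun (acc : PySem.Set String × List String) root =>
      if PySem.Set.contains acc.1 root then acc
      else
        let r := walkB graph acc.1 root [] PySem.Dict.empty
        let cl := match r.2.1.get? r.2.2 with
          | some i => acc.2 ++ PySem.List.slice r.1 (some i) none
          | none => acc.2
        (PySem.Set.update acc.1 r.1, cl))
    (PySem.Set.empty, [])
  let cycle_nodes := PySem.Set.ofList acc.2
  if cycle_nodes.isEmpty then (graph.items, PySem.Set.empty)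
  else ((PySem.Dict.ofList (graph.items.filter
          (fun kv => !(PySem.Set.contains cycle_nodes kv.1)))).items, cycle_nodes)

-- ===== PRECONDITION & SPEC =====
def Spec_prune_cycles_py (raw_map : List (String × String)) (out : (List (String × String)) × List String) : Prop := out = prune_cycles_py_alt raw_map
instance (raw_map : List (String × String)) (out : (List (String × String)) × List String) : Decidable (Spec_prune_cycles_py raw_map out) := by unfold Spec_prune_cycles_py; infer_instance

-- ===== CLAIM (what is proved, stated in full; the proofs are below) =====
def Claim_equal_prune_cycles_py : Prop := ∀ (raw_map : List (String × String)), Dom_prune_cycles_py raw_map → Spec_prune_cycles_py raw_map (prune_cycles_py raw_map)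

-- ===== LEMMAS AND PROOFS =====

-- Abstract one-root walk of A's dfs: returns (tail of newly stacked nodes, cycle segment).
def walkA (g : PySem.Dict String String) (V C : PySem.Set String) (node : String)
    (stack : List String) : List String × List String :=
  if PySem.Set.contains V node || PySem.Set.contains C node then ([], [])
  else if stack.contains node then
    ([], PySem.List.slice stack
      (some (((PySem.List.index? stack node).map Int.ofNat).getD 0)) none)
  else
    match h : g.get? node with
    | some t =>
      let r := walkA g V C t (stack ++ [node])
      (node :: r.1, r.2)
    | none => ([node], [])
termination_by (g.keys.filter (fun k => !(stack.contains k))).length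
decreasing_by
  refine pvFilterLenLt _ _ _ ?_ node (pvMemKeys_of_get? h) ?_ ?_
  · intro y hy
    simp only [List.contains_append, Bool.not_or, Bool.and_eq_true] at hy
    simp_all
  · simpa using ‹¬stack.contains node = true›
  · simp

theorem pvDiscard_append (s : PySem.Set String) (x : String) (h : x ∉ s) :
    PySem.Set.discard (s ++ [x]) x = s := by
  simp only [PySem.Set.discard, List.filter_append, List.filter_cons, List.filter_nil]
  rw [List.filter_eq_self.2]
  · simp
  · intro a ha; simp; exact fun e => absurd (e ▸ ha) h

theorem pvOfList_append (stack : List String) (node : String) (h : node ∉ stack) :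
    PySem.Set.ofList (stack ++ [node]) = PySem.Set.ofList stack ++ [node] := by
  rw [PySem.Set.ofList_append_singleton,
      PySem.Set.add_of_not_mem (by simpa [PySem.Set.mem_ofList] using h)]

theorem dfsA_eq (g : PySem.Dict String String) (node : String) (stack : List String)
    (V C : PySem.Set String) :
    dfsA g node stack V (PySem.Set.ofList stack) C =
      (PySem.Set.update V (walkA g V C node stack).1.reverse,
       PySem.Set.ofList stack,
       PySem.Set.update C (walkA g V C node stack).2) := by
  fun_induction walkA g V C node stack with
  | case1 node stack hg =>
    rw [dfsA.eq_def, if_pos hg]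
    simp [PySem.Set.update]
  | case2 node stack hg hs =>
    have hact : (PySem.Set.ofList stack).contains node = true := by
      simp only [PySem.Set.contains_eq_listContains]
      simpa [PySem.Set.mem_ofList] using hs
    rw [dfsA.eq_def, if_neg hg, if_pos hact]
    simp [PySem.Set.update]
  | case3 node stack hg hs t ht r ih =>
    have hns : node ∉ stack := by simpa using hs
    have hact : ¬ (PySem.Set.ofList stack).contains node = true := by
      simp only [PySem.Set.contains_eq_listContains]
      simpa [PySem.Set.mem_ofList] using hns
    have hadd : PySem.Set.add (PySem.Set.ofList stack) node
        = PySem.Set.ofList (stack ++ [node]) :=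
      (PySem.Set.ofList_append_singleton stack node).symm
    rw [dfsA.eq_def, if_neg hg, if_neg hact]
    show ((match h : g.get? node with
      | some t => dfsA g t (stack ++ [node]) V ((PySem.Set.ofList stack).add node) C
      | none => (V, (PySem.Set.ofList stack).add node, C)).1.add node, _, _) = _
    split
    next t' heq =>
      rw [ht] at heq
      cases heq
      rw [hadd, ih, pvOfList_append stack node hns]
      rw [show ((PySem.Set.ofList stack ++ [node]) : PySem.Set String).discard node
            = PySem.Set.ofList stack from pvDiscard_append _ _
            (by simpa [PySem.Set.mem_ofList] using hns)]
      simp [PySem.Set.update, List.foldl_append]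
      exact ⟨rfl, rfl⟩
    next heq => rw [ht] at heq; cases heq
  | case4 node stack hg hs ht =>
    have hns : node ∉ stack := by simpa using hs
    have hact : ¬ (PySem.Set.ofList stack).contains node = true := by
      simp only [PySem.Set.contains_eq_listContains]
      simpa [PySem.Set.mem_ofList] using hns
    rw [dfsA.eq_def, if_neg hg, if_neg hact]
    show ((match h : g.get? node with
      | some t => dfsA g t (stack ++ [node]) V ((PySem.Set.ofList stack).add node) C
      | none => (V, (PySem.Set.ofList stack).add node, C)).1.add node, _, _) = _
    split
    next t' heq => rw [ht] at heq; cases heq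
    next heq =>
      rw [show PySem.Set.add (PySem.Set.ofList stack) node
            = PySem.Set.ofList stack ++ [node] from by
          rw [PySem.Set.add_of_not_mem (by simpa [PySem.Set.mem_ofList] using hns)]]
      rw [show ((PySem.Set.ofList stack ++ [node]) : PySem.Set String).discard node
            = PySem.Set.ofList stack from pvDiscard_append _ _
            (by simpa [PySem.Set.mem_ofList] using hns)]
      simp [PySem.Set.update]

theorem pvPosNone {stack : List String} {pos : PySem.Dict String Int} {x : String}
    (hpos : ∀ x, pos.get? x = (PySem.List.index? stack x).map (fun n => (n : Int)))
    (hx : x ∉ stack) : pos.get? x = none := by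
  rw [hpos, (PySem.List.index?_eq_none_iff stack x).2 hx]
  rfl

theorem walk_agree (g : PySem.Dict String String) (V C resolved : PySem.Set String) :
    ∀ (node : String) (stack : List String) (pos : PySem.Dict String Int),
    (∀ x, x ∈ g.keys → ((x ∈ V ∨ x ∈ C) ↔ x ∈ resolved)) →
    (∀ x, pos.get? x = (PySem.List.index? stack x).map (fun n => (n : Int))) →
    (∀ x ∈ stack, x ∉ V ∧ x ∉ C) →
    (∀ x ∈ stack, x ∈ g.keys) →
    stack.Nodup →
    ∃ ext : List String,
      (walkB g resolved node stack pos).1 = stack ++ ext ∧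
      (walkA g V C node stack).2 =
        (match (walkB g resolved node stack pos).2.1.get?
               (walkB g resolved node stack pos).2.2 with
         | some i => PySem.List.slice (walkB g resolved node stack pos).1 (some i) none
         | none => []) ∧
      (∀ x, x ∈ g.keys → (x ∈ (walkA g V C node stack).1 ↔ x ∈ ext)) ∧
      (∀ x ∈ ext, x ∈ g.keys ∧ x ∉ V ∧ x ∉ C) ∧
      (stack ++ ext).Nodup := by
  intro node stack pos hres
  fun_induction walkB g resolved node stack pos with
  | case1 node stack pos hcond ih =>
    intro hpos hfresh hkeys hnodup
    simp only [Bool.and_eq_true, Bool.not_eq_true'] at hcond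
    obtain ⟨⟨hgc, hnres⟩, hnpos⟩ := hcond
    have hmem : node ∈ g.keys := (PySem.Dict.contains_iff_mem_keys g node).1 hgc
    have hnotres : node ∉ resolved := by
      intro hm
      rw [← PySem.Set.contains_iff] at hm
      have h2 := hnres
      rw [hm] at h2
      exact Bool.noConfusion h2
    have hnVC : node ∉ V ∧ node ∉ C := by
      have := (hres node hmem)
      constructor <;> intro hm <;> exact hnotres (this.1 (by tauto))
    have hns : node ∉ stack := by
      intro hm
      have h1 : pos.get? node = none := by
        rw [PySem.Dict.contains_eq_isSome_get?] at hnpos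
        cases h : pos.get? node with
        | none => rfl
        | some v => rw [h] at hnpos; simp at hnpos
      rw [hpos node] at h1
      have : PySem.List.index? stack node = none := by
        cases h : PySem.List.index? stack node with
        | none => rfl
        | some k => rw [h] at h1; simp at h1
      exact ((PySem.List.index?_eq_none_iff stack node).1 this) hm
    obtain ⟨t, ht⟩ : ∃ t, g.get? node = some t := by
      rw [PySem.Dict.contains_eq_isSome_get?] at hgc
      cases h : g.get? node with
      | none => rw [h] at hgc; simp at hgc
      | some v => exact ⟨v, rfl⟩
    have hgetD : (g.get? node).getD "" = t := by rw [ht]; rfl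
    have hv : ¬ (PySem.Set.contains V node || PySem.Set.contains C node) = true := by
      simp only [PySem.Set.contains_eq_listContains, Bool.or_eq_true]
      simp [hnVC.1, hnVC.2]
    have hsc : ¬ stack.contains node = true := by simpa using hns
    have hwA : walkA g V C node stack =
        (node :: (walkA g V C t (stack ++ [node])).1,
         (walkA g V C t (stack ++ [node])).2) := by
      rw [walkA.eq_def, if_neg hv, if_neg hsc]
      split
      next t' heq => rw [ht] at heq; cases heq; rfl
      next heq => rw [ht] at heq; cases heq
    have hpos' : ∀ x, (pos.insert node (stack.length : Int)).get? x =
        (PySem.List.index? (stack ++ [node]) x).map (fun n => (n : Int)) := by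
      intro x
      by_cases hx : x = node
      · subst hx
        rw [PySem.Dict.get?_insert_self, PySem.List.index?_append_singleton_self _ _ hns]
        rfl
      · rw [PySem.Dict.get?_insert_of_ne _ _ hx, hpos x]
        by_cases hxs : x ∈ stack
        · rw [PySem.List.index?_append_of_mem _ hxs]
        · rw [(PySem.List.index?_eq_none_iff stack x).2 hxs,
              (PySem.List.index?_eq_none_iff (stack ++ [node]) x).2 (by
                intro hm
                rcases List.mem_append.1 hm with h | h
                · exact hxs h
                · simp at h; exact hx h)]
    have hfresh' : ∀ x ∈ stack ++ [node], x ∉ V ∧ x ∉ C := by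
      intro x hx
      rcases List.mem_append.1 hx with h | h
      · exact hfresh x h
      · simp at h; subst h; exact hnVC
    have hkeys' : ∀ x ∈ stack ++ [node], x ∈ g.keys := by
      intro x hx
      rcases List.mem_append.1 hx with h | h
      · exact hkeys x h
      · simp at h; subst h; exact hmem
    have hnodup' : (stack ++ [node]).Nodup := by
      simp [List.nodup_append, hnodup]
      exact fun a ha e => hns (e ▸ ha)
    rw [hgetD] at ih
    obtain ⟨ext', hpath, hseg, htail, hprops, hnd⟩ := ih hpos' hfresh' hkeys' hnodup'
    rw [hgetD, hwA]
    refine ⟨node :: ext', ?_, ?_, ?_, ?_, ?_⟩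
    · rw [hpath, List.append_assoc]; rfl
    · exact hseg
    · intro x hk
      simp only [List.mem_cons]
      rw [htail x hk]
    · intro x hx
      rcases List.mem_cons.1 hx with rfl | h
      · exact ⟨hmem, hnVC.1, hnVC.2⟩
      · exact hprops x h
    · rw [show stack ++ node :: ext' = (stack ++ [node]) ++ ext' from by simp]
      exact hnd
  | case2 node stack pos hcond =>
    intro hpos hfresh hkeys hnodup
    refine ⟨[], by rw [List.append_nil], ?_, ?_, by intro x hx; simp at hx, by simpa using hnodup⟩
    · -- cycle segment agreement
      by_cases hVC : (PySem.Set.contains V node || PySem.Set.contains C node) = true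
      · have hns : node ∉ stack := by
          intro hm
          rw [Bool.or_eq_true] at hVC
          rcases hVC with h | h
          · exact (hfresh node hm).1 ((PySem.Set.contains_iff V node).1 h)
          · exact (hfresh node hm).2 ((PySem.Set.contains_iff C node).1 h)
        rw [walkA.eq_def, if_pos hVC, pvPosNone hpos hns]
      · by_cases hsn : node ∈ stack
        · obtain ⟨k, hk⟩ : ∃ k, PySem.List.index? stack node = some k := by
            cases h : PySem.List.index? stack node with
            | some k => exact ⟨k, rfl⟩
            | none => exact absurd ((PySem.List.index?_eq_none_iff stack node).1 h) (by simp [hsn])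
          rw [walkA.eq_def, if_neg hVC, if_pos (by simpa using hsn), hpos node, hk]
          simp
        · have hgc : g.contains node = false := by
            by_contra hc
            simp only [Bool.not_eq_false] at hc
            have hmem : node ∈ g.keys := (PySem.Dict.contains_iff_mem_keys g node).1 hc
            have hrs : node ∈ resolved := by
              by_contra hr
              have h1 : PySem.Set.contains resolved node = false := by
                cases h : PySem.Set.contains resolved node with
                | false => rfl
                | true => exact absurd ((PySem.Set.contains_iff resolved node).1 h) hr
              have h2 : pos.contains node = false := by
                rw [PySem.Dict.contains_eq_isSome_get?, pvPosNone hpos hsn]; rfl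
              simp [hc, h2] at hcond
              exact hr hcond
            have := (hres node hmem).2 hrs
            rcases this with h | h
            · exact (by simpa [PySem.Set.contains_eq_listContains] using hVC : ¬(node ∈ V ∨ node ∈ C)) (Or.inl h)
            · exact (by simpa [PySem.Set.contains_eq_listContains] using hVC : ¬(node ∈ V ∨ node ∈ C)) (Or.inr h)
          have hget : g.get? node = none := by
            rw [PySem.Dict.contains_eq_isSome_get?] at hgc
            cases h : g.get? node with
            | none => rfl
            | some v => rw [h] at hgc; simp at hgc
          rw [walkA.eq_def, if_neg hVC, if_neg (by simpa using hsn), pvPosNone hpos hsn]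
          split
          next t' heq => rw [hget] at heq; cases heq
          next heq => rfl
    · -- tail membership agreement (ext = [])
      intro x hk
      simp only [List.not_mem_nil, iff_false]
      by_cases hVC : (PySem.Set.contains V node || PySem.Set.contains C node) = true
      · rw [walkA.eq_def, if_pos hVC]; simp
      · by_cases hsn : node ∈ stack
        · rw [walkA.eq_def, if_neg hVC, if_pos (by simpa using hsn)]; simp
        · have hgc : g.contains node = false := by
            by_contra hc
            simp only [Bool.not_eq_false] at hc
            have hmem : node ∈ g.keys := (PySem.Dict.contains_iff_mem_keys g node).1 hc
            have hrs : node ∈ resolved := by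
              by_contra hr
              have h1 : PySem.Set.contains resolved node = false := by
                cases h : PySem.Set.contains resolved node with
                | false => rfl
                | true => exact absurd ((PySem.Set.contains_iff resolved node).1 h) hr
              have h2 : pos.contains node = false := by
                rw [PySem.Dict.contains_eq_isSome_get?, pvPosNone hpos hsn]; rfl
              simp [hc, h2] at hcond
              exact hr hcond
            have := (hres node hmem).2 hrs
            rcases this with h | h
            · exact (by simpa [PySem.Set.contains_eq_listContains] using hVC : ¬(node ∈ V ∨ node ∈ C)) (Or.inl h)
            · exact (by simpa [PySem.Set.contains_eq_listContains] using hVC : ¬(node ∈ V ∨ node ∈ C)) (Or.inr h)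
          have hget : g.get? node = none := by
            rw [PySem.Dict.contains_eq_isSome_get?] at hgc
            cases h : g.get? node with
            | none => rfl
            | some v => rw [h] at hgc; simp at hgc
          have hnk : x ≠ node := by
            rintro rfl
            exact absurd ((PySem.Dict.contains_iff_mem_keys g x).2 hk) (by simp [hgc])
          rw [walkA.eq_def, if_neg hVC, if_neg (by simpa using hsn)]
          split
          next t' heq => rw [hget] at heq; cases heq
          next heq => simpa using hnk

theorem pvSliceSublist (xs : List String) (i : Option Int) :
    (PySem.List.slice xs i none).Sublist xs := by
  simp only [PySem.List.slice]
  exact (List.take_sublist _ _).trans (List.drop_sublist _ _)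

theorem fold_agree (g : PySem.Dict String String) :
    ∀ (roots : List String) (V C resolved : PySem.Set String) (cl : List String),
    (∀ x ∈ roots, x ∈ g.keys) →
    (∀ x, x ∈ g.keys → ((x ∈ V ∨ x ∈ C) ↔ x ∈ resolved)) →
    (∀ x ∈ C, x ∈ V) →
    C = cl → C.Nodup →
    (roots.foldl
      (fun (st : PySem.Set String × PySem.Set String × PySem.Set String) node =>
        if !(PySem.Set.contains st.1 node) then dfsA g node [] st.1 st.2.1 st.2.2 else st)
      (V, PySem.Set.ofList [], C)).2.2 =
      (roots.foldl
        (fun (acc : PySem.Set String × List String) root =>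
          if PySem.Set.contains acc.1 root then acc
          else
            let r := walkB g acc.1 root [] PySem.Dict.empty
            let cl := match r.2.1.get? r.2.2 with
              | some i => acc.2 ++ PySem.List.slice r.1 (some i) none
              | none => acc.2
            (PySem.Set.update acc.1 r.1, cl))
        (resolved, cl)).2 ∧
    (roots.foldl
      (fun (st : PySem.Set String × PySem.Set String × PySem.Set String) node =>
        if !(PySem.Set.contains st.1 node) then dfsA g node [] st.1 st.2.1 st.2.2 else st)
      (V, PySem.Set.ofList [], C)).2.2.Nodup := by
  intro roots
  induction roots with
  | nil =>
    intro V C resolved cl hroots hres hCV hCcl hnd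
    subst hCcl
    exact ⟨rfl, hnd⟩
  | cons root roots ih =>
    intro V C resolved cl hroots hres hCV hCcl hnd
    have hrkeys : root ∈ g.keys := hroots root (List.mem_cons_self)
    rw [List.foldl_cons, List.foldl_cons]
    by_cases hv : root ∈ V
    · have hAg : (!(PySem.Set.contains V root)) = false := by
        rw [(PySem.Set.contains_iff V root).2 hv]; rfl
      have hBg : PySem.Set.contains resolved root = true :=
        (PySem.Set.contains_iff resolved root).2 ((hres root hrkeys).1 (Or.inl hv))
      rw [hAg, hBg]
      simp only [Bool.false_eq_true, if_false, if_true]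
      exact ih V C resolved cl (fun x hx => hroots x (List.mem_cons_of_mem _ hx)) hres hCV hCcl hnd
    · have hnc : root ∉ C := fun hc => hv (hCV root hc)
      have hnres : root ∉ resolved := fun hr => by
        rcases (hres root hrkeys).2 hr with h | h
        · exact hv h
        · exact hnc h
      have hAg : (!(PySem.Set.contains V root)) = true := by
        rw [show PySem.Set.contains V root = false from by
          cases h : PySem.Set.contains V root with
          | false => rfl
          | true => exact absurd ((PySem.Set.contains_iff V root).1 h) hv]
        rfl
      have hBg : PySem.Set.contains resolved root = false := by
        cases h : PySem.Set.contains resolved root with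
        | false => rfl
        | true => exact absurd ((PySem.Set.contains_iff resolved root).1 h) hnres
      rw [hAg, hBg]
      simp only [if_true, Bool.false_eq_true, if_false]
      rw [dfsA_eq g root [] V C]
      obtain ⟨ext, hpath, hseg, htail, hprops, hnd2⟩ :=
        walk_agree g V C resolved root [] PySem.Dict.empty hres
          (by intro x; rfl) (by intro x hx; cases hx) (by intro x hx; cases hx) List.nodup_nil
      have hextnd : ext.Nodup := by simpa using hnd2
      have hextpath : (walkB g resolved root [] PySem.Dict.empty).1 = ext := by
        simpa using hpath
      -- the new cycle list: cl ++ seg in both programs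
      set r := walkB g resolved root [] PySem.Dict.empty with hr
      have hsegsub : ∀ x ∈ (walkA g V C root []).2, x ∈ ext := by
        intro x hx
        rw [hseg] at hx
        cases hm : (r.2.1.get? r.2.2) with
        | some i =>
          rw [hm] at hx
          exact hextpath ▸ (pvSliceSublist _ _).mem hx
        | none => rw [hm] at hx; cases hx
      have hsegnd : (walkA g V C root []).2.Nodup := by
        rw [hseg]
        cases hm : (r.2.1.get? r.2.2) with
        | some i =>
          show (PySem.List.slice r.1 (some i) none).Nodup
          exact (pvSliceSublist r.1 (some i)).nodup (by rw [hextpath]; exact hextnd)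
        | none => exact List.nodup_nil
      have hCupd : PySem.Set.update C (walkA g V C root []).2 = C ++ (walkA g V C root []).2 :=
        PySem.Set.update_eq_append_of_disjoint _ _ hsegnd
          (fun x hx => (hprops x (hsegsub x hx)).2.2)
      have hclB : (match r.2.1.get? r.2.2 with
          | some i => cl ++ PySem.List.slice r.1 (some i) none
          | none => cl) = cl ++ (walkA g V C root []).2 := by
        cases hm : (r.2.1.get? r.2.2) with
        | some i => rw [hseg, hm]
        | none => rw [hseg, hm]; simp
      rw [hclB]
      apply ih
      · exact fun x hx => hroots x (List.mem_cons_of_mem _ hx)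
      · -- invariant on resolved
        intro x hk
        rw [hCupd]
        constructor
        · intro hx
          rcases hx with hx | hx
          · rcases (PySem.Set.mem_update _ _ _).1 hx with hx | hx
            · exact (PySem.Set.mem_update _ _ _).2 (Or.inl ((hres x hk).1 (Or.inl hx)))
            · rw [List.mem_reverse] at hx
              rw [hextpath]
              exact (PySem.Set.mem_update _ _ _).2 (Or.inr ((htail x hk).1 hx))
          · rcases List.mem_append.1 hx with hx | hx
            · exact (PySem.Set.mem_update _ _ _).2 (Or.inl ((hres x hk).1 (Or.inr hx)))
            · rw [hextpath]
              exact (PySem.Set.mem_update _ _ _).2 (Or.inr (hsegsub x hx))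
        · intro hx
          rcases (PySem.Set.mem_update _ _ _).1 hx with hx | hx
          · rcases (hres x hk).2 hx with h | h
            · exact Or.inl ((PySem.Set.mem_update _ _ _).2 (Or.inl h))
            · exact Or.inr (List.mem_append.2 (Or.inl h))
          · rw [hextpath] at hx
            exact Or.inl ((PySem.Set.mem_update _ _ _).2
              (Or.inr (List.mem_reverse.2 ((htail x ((hprops x hx).1)).2 hx))))
      · -- cycle ⊆ visited
        intro x hx
        rw [hCupd] at hx
        rcases List.mem_append.1 hx with hx | hx
        · exact (PySem.Set.mem_update _ _ _).2 (Or.inl (hCV x hx))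
        · have hxe := hsegsub x hx
          exact (PySem.Set.mem_update _ _ _).2
            (Or.inr (List.mem_reverse.2 ((htail x ((hprops x hxe).1)).2 hxe)))
      · rw [hCupd, hCcl]
      · rw [hCupd]
        rw [List.nodup_append]
        refine ⟨hnd, hsegnd, ?_⟩
        intro a ha b hb e
        exact (hprops b (hsegsub b hb)).2.2 (e ▸ ha)


theorem erase_foldl_items (L : List String) :
    ∀ (d : PySem.Dict String String),
    (L.foldl (fun (h : PySem.Dict String String) n => h.erase n) d).items =
      d.items.filter (fun kv => !(L.contains kv.1)) := by
  induction L with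
  | nil => intro d; simp
  | cons n L ih =>
    intro d
    rw [List.foldl_cons, ih]
    simp only [PySem.Dict.erase]
    rw [List.filter_filter]
    apply List.filter_congr
    intro kv _
    by_cases h1 : kv.1 = n <;> by_cases h2 : kv.1 ∈ L <;> simp_all

theorem items_ofList_self (l : List (String × String))
    (h : (l.map Prod.fst).Nodup) : (PySem.Dict.ofList l).items = l := by
  have := PySem.Dict.items_foldl_insert_fresh (l := l) (k := Prod.fst) (v := Prod.snd)
    (d := PySem.Dict.empty) (by intro a _; simp) h
  simpa [PySem.Dict.ofList, PySem.Dict.update] using this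

-- ===== VERDICT (by name: the statement is the Claim_ definition above) =====
theorem prune_cycles_py_spec : Claim_equal_prune_cycles_py := by
  intro raw_map _
  unfold Spec_prune_cycles_py prune_cycles_py prune_cycles_py_alt
  have main := fold_agree (PySem.Dict.ofList raw_map) (PySem.Dict.ofList raw_map).keys
    [] [] [] [] (fun x hx => hx) (by intro x _; simp) (by intro x hx; cases hx) rfl
    List.nodup_nil
  set g := PySem.Dict.ofList raw_map with hg
  dsimp only
  set cA := (g.keys.foldl
      (fun (st : PySem.Set String × PySem.Set String × PySem.Set String) node =>
        if !(PySem.Set.contains st.1 node) then dfsA g node [] st.1 st.2.1 st.2.2 else st)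
      (PySem.Set.empty, PySem.Set.empty, PySem.Set.empty)).2.2 with hcA
  set cB := (g.keys.foldl
        (fun (acc : PySem.Set String × List String) root =>
          if PySem.Set.contains acc.1 root then acc
          else
            let r := walkB g acc.1 root [] PySem.Dict.empty
            let cl := match r.2.1.get? r.2.2 with
              | some i => acc.2 ++ PySem.List.slice r.1 (some i) none
              | none => acc.2
            (PySem.Set.update acc.1 r.1, cl))
        (PySem.Set.empty, [])).2 with hcB
  have hEq : cA = cB := main.1
  have hnd : cA.Nodup := main.2
  rw [PySem.Set.ofList_eq_self_of_nodup _ (hEq ▸ hnd), ← hEq]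
  by_cases hIsE : cA.isEmpty
  · rw [if_pos hIsE, if_pos hIsE]
  · rw [if_neg hIsE, if_neg hIsE]
    have hknd : ((g.items.filter
        (fun kv => !(PySem.Set.contains cA kv.1))).map Prod.fst).Nodup :=
      ((List.filter_sublist).map Prod.fst).nodup (PySem.Dict.nodup_keys_ofList raw_map)
    rw [items_ofList_self _ hknd, erase_foldl_items]
    simp only [PySem.Set.contains_eq_listContains]
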